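-- pv_equiv track=rewrite | github.com/dimon58/djgram | contrib/admin/dialogs/utils.py | prepare_rows
-- ===== SOURCE A (Python) =====
-- from typing import Any
--
-- def prepare_rows(rows: list[list[Any]]) -> list[str]:
--     """
--     Преобразует результат выполнения запроса к базе данных в список строк вида
--
--     │значение_1│значение_2│...│значение_n│
--     │значение_1│значе_2   │...│значение_n│
--     │знач_1    │значение_2│...│значение_n│
--     │значение_1│знач    _2│...│знач_n    │
--     │знач    _1│знач    _2│...│знач_n    │
--
--     То есть дополняет каждую строку пробелами до одинаковой длинны
--     """
--
--     # Если передан пустой список, то возвращаем пустой список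
--     if len(rows) == 0:
--         return []
--
--     if len(rows[0]) == 1:
--         return [row[0] for row in rows]
--
--     # Список с максимальными длинами каждого элемента, пока его просто инициализируем нулями
--     max_lengths = [0 for _ in range(len(rows[0]))]
--
--     # Ищем максимальную длину каждого элемента в строке
--     for row in rows:
--         for idx, (elem, max_len) in enumerate(zip(row, max_lengths, strict=True)):
--             max_lengths[idx] = max(len(str(elem)), max_len)
--
--     # Преобразуем данные в массив строк, каждая строка содержит элементы,
--     # разделённые символом "│" и дополненные справа пробелами до соответствующей максимальной длины
--     row_stings = []
--     for row in rows:
--         _row_string = "│"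
--         for elem, max_len in zip(row, max_lengths, strict=True):
--             _row_string += f"{elem}{' ' * (((max_len - len(str(elem))) * 285) // 100)}│"
--
--         row_stings.append(_row_string)
--
--     return row_stings
-- ===== SOURCE B (Python) =====
-- def prepare_rows(rows: list[list]) -> list[str]:
--     if not rows:
--         return []
--     if len(rows[0]) == 1:
--         return [row[0] for row in rows]
--     # Build the table column by column: one accumulator string per row; for each
--     # column, measure it and immediately append every row's padded cell.
--     outs = ["│"] * len(rows)
--     for col in zip(*rows, strict=True):
--         texts = [str(e) for e in col]
--         w = max(map(len, texts))
--         for i, s in enumerate(texts):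
--             outs[i] += s + " " * (((w - len(s)) * 285) // 100) + "│"
--     return outs
-- ===== Notes on version B (the rewrite author's own statement) =====
-- stated objective: alternative
-- what changed: B builds the table column by column in a single combined pass: it keeps one growing accumulator string per row and, for each column of zip(*rows, strict=True), computes the column width and immediately appends every row's padded cell, instead of A's two staged passes (a mutable per-column widths list updated row by row, then a separate per-row padding pass).
import Mathlib
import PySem

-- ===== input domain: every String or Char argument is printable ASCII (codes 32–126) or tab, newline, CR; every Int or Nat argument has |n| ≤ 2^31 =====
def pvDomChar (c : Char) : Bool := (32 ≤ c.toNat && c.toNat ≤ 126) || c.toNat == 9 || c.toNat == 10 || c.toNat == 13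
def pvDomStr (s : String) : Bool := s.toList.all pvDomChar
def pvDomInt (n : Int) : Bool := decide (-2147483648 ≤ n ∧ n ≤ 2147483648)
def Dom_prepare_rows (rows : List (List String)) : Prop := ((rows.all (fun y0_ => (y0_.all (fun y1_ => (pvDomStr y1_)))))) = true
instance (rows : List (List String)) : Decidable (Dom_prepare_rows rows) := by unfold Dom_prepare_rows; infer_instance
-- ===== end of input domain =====

-- B builds the table column by column in one combined pass (per-row accumulator
-- strings, each column measured and appended to all rows at once) instead of A's
-- staged widths-list computation followed by a per-row padding pass; objective:
-- alternative, same cost.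


-- ===== PORT A =====
-- Row-major staged passes: a mutable list of per-column maxima updated row by
-- row, then each output line accumulated by repeated += concatenation.  Python's
-- len(str(e)) on a string e is e.toList.length.  Where Python raises —
-- strict=True zip on ragged rows, row[0] on an empty row — the port totalises
-- (truncating zip, getD) and Pre_ excludes exactly those inputs.
def prepare_rows (rows : List (List String)) : List String :=
  match rows with
  | [] => []
  | r0 :: _ =>
    if r0.length = 1 then
      rows.map (fun row => (PySem.List.pyGet? row 0).getD "")
    else
      let maxLengths := rows.foldl
        (fun ml row => (List.zip row ml).map (fun p => max p.1.toList.length p.2))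
        ((List.range r0.length).map (fun _ => 0))
      rows.foldl (fun acc row =>
        acc ++ [String.ofList ((List.zip row maxLengths).foldl
          (fun s p => s ++ p.1.toList
            ++ List.replicate (((p.2 - p.1.toList.length) * 285) / 100) ' ' ++ ['│'])
          ['│'])]) []

-- ===== PORT B =====
-- Single combined column-by-column pass: one accumulator per row ('│' to start);
-- for each column of zip(*rows) compute its width and append the padded cell to
-- every row's accumulator.  zip(*rows) truncates to the shortest row (the min
-- fold); strict=True raggedness is excluded by Pre_.
def prepare_rows_alt (rows : List (List String)) : List String :=
  match rows with
  | [] => []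
  | r0 :: _ =>
    if r0.length = 1 then
      rows.map (fun row => (PySem.List.pyGet? row 0).getD "")
    else
      let ncols := rows.foldl (fun m r => min m r.length) r0.length
      let outs := (List.range ncols).foldl
        (fun outs j =>
          let texts := rows.map (fun r => (r.getD j "").toList)
          let w := (texts.map List.length).foldl max 0
          List.zipWith (fun o s =>
            o ++ s ++ List.replicate (((w - s.length) * 285) / 100) ' ' ++ ['│'])
            outs texts)
        (rows.map (fun _ => ['│']))
      outs.map String.ofList

-- ===== PRECONDITION & SPEC =====
-- Pre_ excludes exactly the inputs where A raises: ragged rows (ValueError from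
-- the strict=True zips when the first row is not single-column) and an empty row
-- when the first row is single-column (IndexError from row[0]).  B raises on the
-- same inputs with the same exception types.
def Pre_prepare_rows (rows : List (List String)) : Prop :=
  if (rows.headD []).length = 1 then ∀ r ∈ rows, r ≠ []
  else ∀ r ∈ rows, r.length = (rows.headD []).length
instance (rows : List (List String)) : Decidable (Pre_prepare_rows rows) := by
  unfold Pre_prepare_rows; infer_instance

def pvWitness_prepare_rows : List (List String) := [["a", "bb"], ["ccc", "d"]]

def Spec_prepare_rows (rows : List (List String)) (out : List String) : Prop := out = prepare_rows_alt rows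
instance (rows : List (List String)) (out : List String) : Decidable (Spec_prepare_rows rows out) := by unfold Spec_prepare_rows; infer_instance

-- ===== CLAIM (what is proved, stated in full; the proofs are below) =====
def Claim_equal_prepare_rows : Prop := ∀ (rows : List (List String)), Dom_prepare_rows rows → Pre_prepare_rows rows → Spec_prepare_rows rows (prepare_rows rows)

-- ===== LEMMAS AND PROOFS =====

-- one padded cell (proof-only abbreviation)
def pvCell (s : List Char) (w : Nat) : List Char :=
  s ++ List.replicate (((w - s.length) * 285) / 100) ' ' ++ ['│']

-- column j's width as both ports compute it
def pvW (rows : List (List String)) (j : Nat) : Nat :=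
  (rows.map (fun r => (r.getD j "").toList.length)).foldl max 0

-- zip(*rows) column count is the first-row length when all rows have that length
lemma pv_foldl_min_const (rows : List (List String)) (n : Nat)
    (h : ∀ r ∈ rows, r.length = n) :
    rows.foldl (fun m r => min m r.length) n = n := by
  induction rows with
  | nil => rfl
  | cons r t ih =>
    simp only [List.foldl_cons, h r (by simp), min_self]
    exact ih (fun r hr => h r (by simp [hr]))

-- A's row-major max-update loop computes, per column j, the fold of max over the
-- lengths of column j, started from the initial list's j-th entry.
lemma pv_maxlens_eq (n : Nat) (rows : List (List String))
    (h : ∀ r ∈ rows, r.length = n) (ml : List Nat) (hml : ml.length = n) :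
    rows.foldl (fun ml row => (List.zip row ml).map (fun p => max p.1.toList.length p.2)) ml
      = (List.range n).map (fun j =>
          (rows.map (fun r => (r.getD j "").toList.length)).foldl max (ml.getD j 0)) := by
  induction rows generalizing ml with
  | nil =>
    apply List.ext_getElem
    · simp [hml]
    · intro j h1 h2
      simp only [List.getElem_map, List.getElem_range, List.map_nil, List.foldl_nil]
      rw [List.getD_eq_getElem ml 0 (by simp [hml] at h2 ⊢; omega)]
  | cons r t ih =>
    have hr : r.length = n := h r (by simp)
    have hstep : ((List.zip r ml).map (fun p => max p.1.toList.length p.2)).length = n := by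
      simp [List.length_zip, hr, hml]
    simp only [List.foldl_cons]
    rw [ih (fun r hr => h r (by simp [hr])) _ hstep]
    apply List.map_congr_left
    intro j hj
    have hjn : j < n := List.mem_range.mp hj
    simp only [List.map_cons, List.foldl_cons]
    congr 1
    rw [List.getD_eq_getElem _ 0 (by omega), List.getD_eq_getElem ml 0 (by omega)]
    simp only [List.getElem_map, List.getElem_zip]
    rw [List.getD_eq_getElem r "" (by omega)]
    exact Nat.max_comm _ _

-- zipWith over two maps of the same list is a map
lemma pv_zipWith_map_same {α β γ δ : Type} (f : β → γ → δ) (g : α → β) (h : α → γ)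
    (l : List α) :
    List.zipWith f (l.map g) (l.map h) = l.map (fun x => f (g x) (h x)) := by
  induction l with
  | nil => rfl
  | cons a t ih => simp [ih]

-- B's column-by-column fold: after processing the first n columns, each row's
-- accumulator is '│' followed by that row's first n padded cells.
lemma pvB_fold (rows : List (List String)) (n : Nat) :
    (List.range n).foldl
        (fun outs j =>
          let texts := rows.map (fun r => (r.getD j "").toList)
          let w := (texts.map List.length).foldl max 0
          List.zipWith (fun o s =>
            o ++ s ++ List.replicate (((w - s.length) * 285) / 100) ' ' ++ ['│'])
            outs texts)
        (rows.map (fun _ => ['│']))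
      = rows.map (fun row =>
          '│' :: ((List.range n).map (fun j =>
            pvCell (row.getD j "").toList (pvW rows j))).flatten) := by
  induction n with
  | zero => simp
  | succ n ih =>
    rw [List.range_succ, List.foldl_append, ih, List.foldl_cons, List.foldl_nil]
    simp only
    rw [List.map_map, pv_zipWith_map_same]
    apply List.map_congr_left
    intro row _
    rw [List.map_append, List.flatten_append]
    simp [pvCell, pvW, Function.comp_def]

-- A's += accumulation of one line is '│' followed by its padded cells
lemma pv_rowA (zl : List (String × Nat)) :
    zl.foldl (fun s p => s ++ p.1.toList
        ++ List.replicate (((p.2 - p.1.toList.length) * 285) / 100) ' ' ++ ['│']) ['│']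
      = '│' :: (zl.map (fun p => pvCell p.1.toList p.2)).flatten := by
  simp only [List.append_assoc]
  rw [PySem.List.foldl_append_eq_flatMap]
  simp [pvCell, List.flatMap_def]

-- zipping a full-length row with a widths table indexed by range n
lemma pv_zip_range (row : List String) (n : Nat) (h : row.length = n) (wf : Nat → Nat) :
    (List.zip row ((List.range n).map wf)).map (fun p => pvCell p.1.toList p.2)
      = (List.range n).map (fun j => pvCell (row.getD j "").toList (wf j)) := by
  apply List.ext_getElem
  · simp [List.length_zip, h]
  · intro j h1 h2
    have hjn : j < n := by simpa using h2
    simp only [List.getElem_map, List.getElem_zip, List.getElem_range]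
    rw [List.getD_eq_getElem row "" (by omega)]

-- ===== VERDICT (by name: the statement is the Claim_ definition above) =====
theorem prepare_rows_spec : Claim_equal_prepare_rows := by
  intro rows _ hpre
  unfold Spec_prepare_rows prepare_rows prepare_rows_alt
  match rows with
  | [] => rfl
  | r0 :: t =>
    by_cases h1 : r0.length = 1
    · simp [h1]
    · simp only [h1, if_false]
      unfold Pre_prepare_rows at hpre
      simp only [List.headD_cons, h1, if_false] at hpre
      have hnc : (r0 :: t).foldl (fun m r => min m r.length) r0.length = r0.length :=
        pv_foldl_min_const (r0 :: t) r0.length hpre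
      have hml := pv_maxlens_eq r0.length (r0 :: t) hpre
        ((List.range r0.length).map (fun _ => 0)) (by simp)
      have hinit : ∀ j ∈ List.range r0.length,
          ((r0 :: t).map (fun r => (r.getD j "").toList.length)).foldl max
              ((((List.range r0.length).map (fun _ => (0 : Nat)))).getD j 0)
            = pvW (r0 :: t) j := by
        intro j hj
        have hjn : j < r0.length := List.mem_range.mp hj
        rw [List.getD_eq_getElem _ 0 (by simp [hjn])]
        simp [pvW]
      rw [hnc, pvB_fold, hml, List.map_congr_left hinit,
        PySem.List.foldl_append_singleton_eq_map]
      simp only [List.nil_append, List.map_map]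
      apply List.map_congr_left
      intro row hrow
      simp only [Function.comp]
      rw [pv_rowA, pv_zip_range row r0.length (hpre row hrow) (pvW (r0 :: t))]
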